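-- pv_equiv track=rewrite | github.com/Jia-Zhen-Li/BIRhw | hw3/views.py | keywordCheck
-- ===== SOURCE A (Python) =====
-- def keywordCheck(keywords,insert):
--     keyword_msg = 'Showing results for the following terms: '
--     key = keywords.split()
--     ins = insert.split()
--     f=0
--     for i in range(len(key)):
--         if(key[i] != ins[i]):
--             keyword_msg += '<b style=\"color:red\"> ' + key[i] +'</b>'
--             f +=1
--         else:
--             keyword_msg += '<font style=\"color:gray\"> ' + key[i] +'</font>'
--     if f==0:
--         keyword_msg = ''
--     return keyword_msg
-- ===== SOURCE B (Python) =====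
-- def keywordCheck(keywords, insert):
--     def go(pairs):
--         # recursively build the html back-to-front; second component: any mismatch seen
--         if not pairs:
--             return '', False
--         k, w = pairs[0]
--         tail, diff = go(pairs[1:])
--         if k != w:
--             return '<b style="color:red"> ' + k + '</b>' + tail, True
--         return '<font style="color:gray"> ' + k + '</font>' + tail, diff
--     html, diff = go(list(zip(keywords.split(), insert.split())))
--     return 'Showing results for the following terms: ' + html if diff else ''
-- ===== Notes on version B (the rewrite author's own statement) =====
-- stated objective: alternative
-- what changed: B replaces A's index loop with a counter and discarded message by structural recursion over the zipped word pairs that builds the html back-to-front and threads a mismatch flag, prepending the fixed prefix only when the flag is set; no indices, no counter, no unconditional build.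
import Mathlib
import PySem

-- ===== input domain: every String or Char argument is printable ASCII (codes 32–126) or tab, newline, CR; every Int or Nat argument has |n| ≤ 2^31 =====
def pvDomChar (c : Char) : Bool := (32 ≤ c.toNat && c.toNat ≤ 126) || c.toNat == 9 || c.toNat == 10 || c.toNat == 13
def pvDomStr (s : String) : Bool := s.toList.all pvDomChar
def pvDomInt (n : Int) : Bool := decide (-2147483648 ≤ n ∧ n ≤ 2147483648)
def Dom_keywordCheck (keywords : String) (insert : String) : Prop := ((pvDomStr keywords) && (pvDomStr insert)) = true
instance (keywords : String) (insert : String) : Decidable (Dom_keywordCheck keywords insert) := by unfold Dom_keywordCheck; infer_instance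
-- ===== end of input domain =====

-- B replaces A's index loop + mismatch counter (message built unconditionally, discarded
-- if the counter stayed 0) by structural recursion over the zipped word pairs, building
-- the html back-to-front with a mismatch flag; same O(n) cost, different decomposition.

-- ===== PORT A =====
-- key[i] is always in range (i < len(key)); ins[i] may be out of range, where Python raises
-- IndexError — those inputs are excluded by Pre_, so getD's default is never reached there.
def keywordCheck (keywords : String) (insert : String) : String :=
  let key := PySem.Str.split₀ keywords
  let ins := PySem.Str.split₀ insert
  let st := (List.range key.length).foldl
    (fun (st : String × Int) i =>
      if key.getD i "" ≠ ins.getD i "" then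
        (st.1 ++ "<b style=\"color:red\"> " ++ key.getD i "" ++ "</b>", st.2 + 1)
      else
        (st.1 ++ "<font style=\"color:gray\"> " ++ key.getD i "" ++ "</font>", st.2))
    ("Showing results for the following terms: ", (0 : Int))
  if st.2 = 0 then "" else st.1

-- ===== PORT B =====
-- Source B's inner recursive helper go: html built back-to-front, Bool = any mismatch seen
def goKC : List (String × String) → String × Bool
  | [] => ("", false)
  | (k, w) :: rest =>
    let t := goKC rest
    if k ≠ w then ("<b style=\"color:red\"> " ++ k ++ "</b>" ++ t.1, true)
    else ("<font style=\"color:gray\"> " ++ k ++ "</font>" ++ t.1, t.2)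

def keywordCheck_alt (keywords : String) (insert : String) : String :=
  let r := goKC ((PySem.Str.split₀ keywords).zip (PySem.Str.split₀ insert))
  if r.2 then "Showing results for the following terms: " ++ r.1 else ""

-- ===== PRECONDITION & SPEC =====
-- Pre_ excludes exactly the inputs where Python A raises IndexError: insert splitting
-- into fewer words than keywords.
def Pre_keywordCheck (keywords : String) (insert : String) : Prop :=
  (PySem.Str.split₀ keywords).length ≤ (PySem.Str.split₀ insert).length
instance (keywords : String) (insert : String) : Decidable (Pre_keywordCheck keywords insert) := by unfold Pre_keywordCheck; infer_instance
def pvWitness_keywordCheck : String × String := ("cat dog", "cat fish")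

def Spec_keywordCheck (keywords : String) (insert : String) (out : String) : Prop := out = keywordCheck_alt keywords insert
instance (keywords : String) (insert : String) (out : String) : Decidable (Spec_keywordCheck keywords insert out) := by unfold Spec_keywordCheck; infer_instance

-- ===== CLAIM (what is proved, stated in full; the proofs are below) =====
def Claim_equal_keywordCheck : Prop := ∀ (keywords : String) (insert : String), Dom_keywordCheck keywords insert → Pre_keywordCheck keywords insert → Spec_keywordCheck keywords insert (keywordCheck keywords insert)

-- ===== LEMMAS AND PROOFS =====

-- When ins is at least as long as key, A's fold over range(len(key)) with indexing is the
-- fold over the zipped pairs.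
lemma foldl_range_getD_zip {α : Type} (f : α → String → String → α) :
    ∀ (key ins : List String), key.length ≤ ins.length → ∀ (a : α),
      (List.range key.length).foldl (fun acc i => f acc (key.getD i "") (ins.getD i "")) a
        = (key.zip ins).foldl (fun acc p => f acc p.1 p.2) a := by
  intro key
  induction key with
  | nil => intro ins _ a; simp
  | cons k ks ih =>
    intro ins h a
    cases ins with
    | nil => simp at h
    | cons w ws =>
      simp only [List.length_cons, List.range_succ_eq_map, List.foldl_cons, List.foldl_map,
        List.zip_cons_cons, List.getD]
      simpa using ih ws (by simpa using h) (f a k w)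

-- A's pair-state fold over the zipped list = (prefix ++ goKC's html, count of mismatches),
-- and goKC's flag is exactly "count ≠ 0".
lemma foldA_eq_goKC (l : List (String × String)) :
    ∀ (s : String) (c : Int),
      l.foldl
        (fun (st : String × Int) p =>
          if p.1 ≠ p.2 then (st.1 ++ "<b style=\"color:red\"> " ++ p.1 ++ "</b>", st.2 + 1)
          else (st.1 ++ "<font style=\"color:gray\"> " ++ p.1 ++ "</font>", st.2))
        (s, c)
      = (s ++ (goKC l).1, c + (l.countP (fun p => !(p.1 == p.2)) : Int)) := by
  induction l with
  | nil => intro s c; simp [goKC]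
  | cons p rest ih =>
    intro s c
    obtain ⟨k, w⟩ := p
    rw [List.foldl_cons, List.countP_cons]
    by_cases h : k = w
    · have hp : (!(k == w)) = false := by simpa using h
      simp only [goKC, if_neg (not_not_intro h), hp, ih]
      simp [String.append_assoc]
    · have hp : (!(k == w)) = true := by simpa using h
      simp only [goKC, if_pos h, hp, ih]
      refine Prod.ext ?_ ?_
      · simp [String.append_assoc]
      · simp only []
        push_cast
        ring

lemma goKC_snd (l : List (String × String)) :
    (goKC l).2 = !(l.countP (fun p => !(p.1 == p.2)) == 0) := by
  induction l with
  | nil => simp [goKC]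
  | cons p rest ih =>
    obtain ⟨k, w⟩ := p
    by_cases h : k = w
    · have hp : (!(k == w)) = false := by simpa using h
      simp [goKC, h, ih]
    · have hp : (!(k == w)) = true := by simpa using h
      simp [goKC, h, hp]

-- ===== VERDICT (by name: the statement is the Claim_ definition above) =====
theorem keywordCheck_spec : Claim_equal_keywordCheck := by
  intro keywords insert _ hpre
  unfold Spec_keywordCheck keywordCheck keywordCheck_alt
  dsimp only
  rw [foldl_range_getD_zip
        (f := fun (st : String × Int) k w =>
          if k ≠ w then (st.1 ++ "<b style=\"color:red\"> " ++ k ++ "</b>", st.2 + 1)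
          else (st.1 ++ "<font style=\"color:gray\"> " ++ k ++ "</font>", st.2))
        _ _ hpre]
  rw [foldA_eq_goKC]
  rw [goKC_snd]
  simp only [Int.zero_add]
  by_cases hc : (((PySem.Str.split₀ keywords).zip (PySem.Str.split₀ insert)).countP
      (fun p => !(p.1 == p.2))) = 0
  · simp [hc]
  · simp [hc]
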